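-- pv_equiv track=rewrite | github.com/hongleishen/00_python | 100_tmp/4.py | cal_tab2
-- ===== SOURCE A (Python) =====
-- def cal_tab2(tn):
--     gape = 8
--     gapelen = 4
--
--     n = 0
--     for i in range(1, gapelen):
--         if tn  <= gape * i :
--             n = gape*i - tn
--             break
--     return n
-- ===== SOURCE B (Python) =====
-- def cal_tab2(tn):
--     if tn > 24:
--         return 0
--     q = (tn + 7) // 8
--     if q < 1:
--         q = 1
--     return 8 * q - tn
-- ===== Notes on version B (the rewrite author's own statement) =====
-- stated objective: simpler
-- what changed: Replaced the linear search loop over candidate tab stops with a closed-form ceiling computation of the next tab stop (quotient floored at one, early zero return past the loop's range).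
import Mathlib
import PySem

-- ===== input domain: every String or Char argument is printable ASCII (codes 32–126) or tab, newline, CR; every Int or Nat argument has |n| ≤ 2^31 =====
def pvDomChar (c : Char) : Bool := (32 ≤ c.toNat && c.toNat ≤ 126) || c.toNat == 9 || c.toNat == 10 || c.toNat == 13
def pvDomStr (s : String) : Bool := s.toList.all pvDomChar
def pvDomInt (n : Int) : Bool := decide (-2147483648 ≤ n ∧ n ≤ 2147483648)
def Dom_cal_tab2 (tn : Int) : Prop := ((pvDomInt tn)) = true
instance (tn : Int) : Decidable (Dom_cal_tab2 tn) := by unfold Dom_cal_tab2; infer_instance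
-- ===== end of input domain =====

-- B replaces A's break-loop over range(1,4) with a closed-form ceiling computation (objective: simpler).

-- ===== PORT A =====
-- A: loop i over range(1,4); first i with tn <= 8*i sets n = 8*i - tn and breaks; n starts 0.
def cal_tab2 (tn : Int) : Int :=
  let gape : Int := 8
  let gapelen : Int := 4
  let n : Int := 0
  -- for i in range(1, gapelen) with break: fold with an Option marking the break
  let r := (PySem.List.pyRange 1 gapelen 1).foldl
    (fun (st : Option Int) i =>
      match st with
      | some _ => st
      | none => if tn ≤ gape * i then some (gape * i - tn) else none)
    none
  match r with
  | some v => v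
  | none => n

-- ===== PORT B =====
def cal_tab2_alt (tn : Int) : Int :=
  if tn > 24 then 0
  else
    let q := PySem.Int.floordiv (tn + 7) 8
    let q := if q < 1 then 1 else q
    8 * q - tn

-- ===== PRECONDITION & SPEC =====
def Spec_cal_tab2 (tn : Int) (out : Int) : Prop := out = cal_tab2_alt tn
instance (tn : Int) (out : Int) : Decidable (Spec_cal_tab2 tn out) := by unfold Spec_cal_tab2; infer_instance

-- ===== CLAIM (what is proved, stated in full; the proofs are below) =====
def Claim_equal_cal_tab2 : Prop := ∀ (tn : Int), Dom_cal_tab2 tn → Spec_cal_tab2 tn (cal_tab2 tn)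

-- ===== LEMMAS AND PROOFS =====

theorem pyRange_1_4 : PySem.List.pyRange 1 4 1 = [1, 2, 3] := by decide

theorem cal_tab2_eval (tn : Int) :
    cal_tab2 tn = if tn ≤ 8 then 8 - tn else if tn ≤ 16 then 16 - tn
      else if tn ≤ 24 then 24 - tn else 0 := by
  simp only [cal_tab2, pyRange_1_4, List.foldl]
  split_ifs <;> simp_all

-- ===== VERDICT (by name: the statement is the Claim_ definition above) =====
theorem cal_tab2_spec : Claim_equal_cal_tab2 := by
  intro tn _
  unfold Spec_cal_tab2 cal_tab2_alt
  rw [cal_tab2_eval]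
  simp only [PySem.Int.floordiv, Int.fdiv_eq_ediv]
  split_ifs <;> omega
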